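-- pv_equiv track=rewrite | github.com/XiaohanChai/Crown-Generation | tools/merge_2_obj_to_1.py | format_face
-- ===== SOURCE A (Python) =====
-- def format_face(face):
--     """
--     face: list of tuples (v, vt, vn) where entries are ints or None
--     return string like: "f v1/vt1/vn1 v2/vt2/vn2 ..."
--     """
--     parts = []
--     for (v, vt, vn) in face:
--         if vt is None and vn is None:
--             parts.append(str(v))
--         elif vt is None and vn is not None:
--             # v//vn
--             parts.append(f"{v}//{vn}")
--         elif vt is not None and vn is None:
--             parts.append(f"{v}/{vt}")
--         else:
--             parts.append(f"{v}/{vt}/{vn}")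
--     return "f " + " ".join(parts)
-- ===== SOURCE B (Python) =====
-- def format_face(face):
--     parts = []
--     for tup in face:
--         slots = list(tup)
--         while len(slots) > 1 and slots[-1] is None:
--             slots.pop()
--         part = "/".join([str(slots[0])] + ["" if s is None else str(s) for s in slots[1:]])
--         parts.append(part)
--     return "f " + " ".join(parts)
-- ===== Notes on version B (the rewrite author's own statement) =====
-- stated objective: alternative
-- what changed: Replaces A's 4-way if/elif branch per vertex tuple by a trim-then-join: build the 3-slot list, pop trailing None slots while more than one remains, then join with '/', rendering None in a non-leading slot as the empty string.
import Mathlib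
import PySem

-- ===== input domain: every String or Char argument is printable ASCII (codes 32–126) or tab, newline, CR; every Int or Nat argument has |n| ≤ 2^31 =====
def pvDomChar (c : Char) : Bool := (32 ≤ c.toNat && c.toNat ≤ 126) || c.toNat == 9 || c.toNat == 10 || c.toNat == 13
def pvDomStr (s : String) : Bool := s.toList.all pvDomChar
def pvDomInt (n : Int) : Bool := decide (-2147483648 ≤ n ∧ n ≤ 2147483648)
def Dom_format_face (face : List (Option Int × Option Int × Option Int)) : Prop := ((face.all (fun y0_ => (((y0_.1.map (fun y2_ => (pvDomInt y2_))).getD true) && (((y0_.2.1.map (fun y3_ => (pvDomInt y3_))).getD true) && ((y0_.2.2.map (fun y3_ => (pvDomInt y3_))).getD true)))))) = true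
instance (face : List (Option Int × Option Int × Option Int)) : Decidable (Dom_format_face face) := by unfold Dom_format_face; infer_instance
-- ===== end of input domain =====

-- B is a different decomposition: trim trailing Nones from the 3-slot list, then one join — no 4-way branch.

-- str(x) for an Option Int (str(None) = "None")
def pyStrOpt (o : Option Int) : String :=
  match o with
  | none => "None"
  | some n => PySem.Int.toStr n

-- ===== PORT A =====
def format_face (face : List (Option Int × Option Int × Option Int)) : String :=
  let parts := face.foldl (fun parts t =>
    match t with
    | (v, vt, vn) =>
      match vt, vn with
      | none, none => parts ++ [pyStrOpt v]
      | none, some vn => parts ++ [pyStrOpt v ++ "//" ++ PySem.Int.toStr vn]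
      | some vt, none => parts ++ [pyStrOpt v ++ "/" ++ PySem.Int.toStr vt]
      | some vt, some vn => parts ++ [pyStrOpt v ++ "/" ++ PySem.Int.toStr vt ++ "/" ++ PySem.Int.toStr vn]) []
  "f " ++ PySem.Str.join " " parts

-- ===== PORT B =====
-- the 'while len(slots) > 1 and slots[-1] is None: slots.pop()' loop, as structural recursion
def trimSlots (l : List (Option Int)) : List (Option Int) :=
  if _h : 1 < l.length ∧ l.getLast? = some none then trimSlots l.dropLast else l
termination_by l.length
decreasing_by simp [List.length_dropLast]; omega

-- '' if s is None else str(s), for the non-leading slots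
def pyStrBlank (o : Option Int) : String :=
  match o with
  | none => ""
  | some n => PySem.Int.toStr n

def format_face_alt (face : List (Option Int × Option Int × Option Int)) : String :=
  let parts := face.foldl (fun parts t =>
    let slots := trimSlots [t.1, t.2.1, t.2.2]
    let part := PySem.Str.join "/" (pyStrOpt (slots.headD none) :: (slots.drop 1).map pyStrBlank)
    parts ++ [part]) []
  "f " ++ PySem.Str.join " " parts

-- ===== PRECONDITION & SPEC =====
def Spec_format_face (face : List (Option Int × Option Int × Option Int)) (out : String) : Prop := out = format_face_alt face
instance (face : List (Option Int × Option Int × Option Int)) (out : String) : Decidable (Spec_format_face face out) := by unfold Spec_format_face; infer_instance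

-- ===== CLAIM (what is proved, stated in full; the proofs are below) =====
def Claim_equal_format_face : Prop := ∀ (face : List (Option Int × Option Int × Option Int)), Dom_format_face face → Spec_format_face face (format_face face)

-- ===== LEMMAS AND PROOFS =====

theorem part_eq (t : Option Int × Option Int × Option Int) :
    PySem.Str.join "/" (pyStrOpt ((trimSlots [t.1, t.2.1, t.2.2]).headD none) ::
      ((trimSlots [t.1, t.2.1, t.2.2]).drop 1).map pyStrBlank) =
    (match t.2.1, t.2.2 with
      | none, none => pyStrOpt t.1
      | none, some vn => pyStrOpt t.1 ++ "//" ++ PySem.Int.toStr vn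
      | some vt, none => pyStrOpt t.1 ++ "/" ++ PySem.Int.toStr vt
      | some vt, some vn => pyStrOpt t.1 ++ "/" ++ PySem.Int.toStr vt ++ "/" ++ PySem.Int.toStr vn) := by
  obtain ⟨v, vt, vn⟩ := t
  cases vt <;> cases vn <;>
    simp [trimSlots, PySem.Str.join, PySem.Chars.join, pyStrBlank] <;>
    apply String.ext <;> simp [String.toList_append, List.intercalate]

theorem parts_eq (face : List (Option Int × Option Int × Option Int))
    (acc : List String) :
    face.foldl (fun parts t =>
      match t with
      | (v, vt, vn) =>
        match vt, vn with
        | none, none => parts ++ [pyStrOpt v]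
        | none, some vn => parts ++ [pyStrOpt v ++ "//" ++ PySem.Int.toStr vn]
        | some vt, none => parts ++ [pyStrOpt v ++ "/" ++ PySem.Int.toStr vt]
        | some vt, some vn => parts ++ [pyStrOpt v ++ "/" ++ PySem.Int.toStr vt ++ "/" ++ PySem.Int.toStr vn]) acc =
    face.foldl (fun parts t =>
      parts ++ [PySem.Str.join "/" (pyStrOpt ((trimSlots [t.1, t.2.1, t.2.2]).headD none) ::
        ((trimSlots [t.1, t.2.1, t.2.2]).drop 1).map pyStrBlank)]) acc := by
  induction face generalizing acc with
  | nil => rfl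
  | cons t rest ih =>
    have h := part_eq t
    obtain ⟨v, vt, vn⟩ := t
    cases vt <;> cases vn <;> simp only [List.foldl_cons] <;> rw [ih] <;> rw [h]

-- ===== VERDICT (by name: the statement is the Claim_ definition above) =====
theorem format_face_spec : Claim_equal_format_face := by
  intro face _
  unfold Spec_format_face format_face format_face_alt
  rw [parts_eq]
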